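-- pv_equiv track=rewrite | github.com/waldohidalgo/geek-for-geeks-100daysofcodechallenge | day161-170/day167-Greedy/Maximize partitions in a String.py | maxPartitions2
-- ===== SOURCE A (Python) =====
-- def maxPartitions2(s):
--     # code here
--     hs={}
--     for i,c in enumerate(s):
--         if c in hs:
--             hs[c]=max(hs[c],i)
--         else:
--             hs[c]=i
--     max_index=-1
--     count=0
--     for i,c in enumerate(s):
--         max_index=max(max_index,hs[c])
--         if max_index==i:
--             count+=1
--             max_index=-1
--     return count
-- ===== SOURCE B (Python) =====
-- def maxPartitions2(s):
--     # A greedy partition boundary is exactly a position i where the prefix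
--     # s[:i+1] and the suffix s[i+1:] share no character.
--     return sum(1 for i in range(len(s)) if set(s[:i+1]).isdisjoint(s[i+1:]))
-- ===== Notes on version B (the rewrite author's own statement) =====
-- stated objective: simpler
-- what changed: Replaced A's last-index dict plus greedy running-max reset scan by the direct characterisation of a partition boundary: count the positions i where set(s[:i+1]) is disjoint from s[i+1:], a one-line sum.
import Mathlib
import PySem

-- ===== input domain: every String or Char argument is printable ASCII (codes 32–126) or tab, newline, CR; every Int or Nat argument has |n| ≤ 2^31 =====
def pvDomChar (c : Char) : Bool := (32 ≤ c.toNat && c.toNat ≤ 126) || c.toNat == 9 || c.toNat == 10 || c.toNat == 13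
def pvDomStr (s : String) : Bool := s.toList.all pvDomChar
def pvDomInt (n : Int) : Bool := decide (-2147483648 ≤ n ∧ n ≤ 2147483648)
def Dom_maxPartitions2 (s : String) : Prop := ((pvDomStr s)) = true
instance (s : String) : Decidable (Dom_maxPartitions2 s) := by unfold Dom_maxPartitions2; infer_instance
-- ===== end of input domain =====

-- B counts the positions i where s[:i+1] and s[i+1:] share no character (the set-disjointness
-- characterisation of a partition boundary) instead of A's dict of last indices + greedy reset scan;
-- objective: simpler (B is a one-liner; not faster).

-- ===== PORT A =====
-- first loop body: hs[c] = max(hs[c], i) if c in hs else i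
def pvHsStep (hs : PySem.Dict Char Int) (p : Int × Char) : PySem.Dict Char Int :=
  if hs.contains p.2 then hs.insert p.2 (max (hs.getD p.2 0) p.1) else hs.insert p.2 p.1

-- second loop body; hs.getD p.2 0 is Python's hs[c]: the key is always present (c occurs in s),
-- so the default 0 is unreachable
def pvScanStep (hs : PySem.Dict Char Int) (st : Int × Int) (p : Int × Char) : Int × Int :=
  let m := max st.1 (hs.getD p.2 0)
  if m = p.1 then (-1, st.2 + 1) else (m, st.2)

def maxPartitions2 (s : String) : Int :=
  let hs := (PySem.List.enumerate s.toList).foldl pvHsStep PySem.Dict.empty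
  ((PySem.List.enumerate s.toList).foldl (pvScanStep hs) (-1, 0)).2

-- ===== PORT B =====
def maxPartitions2_alt (s : String) : Int :=
  (PySem.List.pyRange 0 (PySem.Str.len s) 1).foldl
    (fun acc i =>
      if PySem.Set.isdisjoint
           (PySem.Set.ofList (PySem.Chars.slice s.toList none (some (i + 1))))
           (PySem.Chars.slice s.toList (some (i + 1)) none)
      then acc + 1 else acc) 0

-- ===== PRECONDITION & SPEC =====
def Spec_maxPartitions2 (s : String) (out : Int) : Prop := out = maxPartitions2_alt s
instance (s : String) (out : Int) : Decidable (Spec_maxPartitions2 s out) := by unfold Spec_maxPartitions2; infer_instance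

-- ===== CLAIM (what is proved, stated in full; the proofs are below) =====
def Claim_equal_maxPartitions2 : Prop := ∀ (s : String), Dom_maxPartitions2 s → Spec_maxPartitions2 s (maxPartitions2 s)

-- ===== LEMMAS AND PROOFS =====

-- option-valued running max: the value of hs at a key after the build loop
def pvOmax (o : Option Int) (i : Int) : Option Int :=
  some (match o with | none => i | some v => max v i)

lemma pvHsStep_get? (d : PySem.Dict Char Int) (p : Int × Char) (c : Char) :
    (pvHsStep d p).get? c = if p.2 = c then pvOmax (d.get? p.2) p.1 else d.get? c := by
  unfold pvHsStep pvOmax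
  rw [PySem.Dict.contains_eq_isSome_get?]
  by_cases hc : p.2 = c
  · subst hc
    cases h : d.get? p.2 <;>
      simp [h, PySem.Dict.get?_insert_self, PySem.Dict.getD_eq_get?_getD]
  · have hne : c ≠ p.2 := fun h => hc h.symm
    split_ifs <;> rw [PySem.Dict.get?_insert_of_ne (hne := hne)]

lemma pvBuild_get? (l : List (Int × Char)) (d : PySem.Dict Char Int) (c : Char) :
    (l.foldl pvHsStep d).get? c
      = ((l.filter (fun p => p.2 == c)).map (·.1)).foldl pvOmax (d.get? c) := by
  induction l generalizing d with
  | nil => rfl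
  | cons p t ih =>
    simp only [List.foldl_cons, List.filter_cons]
    by_cases hc : p.2 = c
    · subst hc; simp [ih, pvHsStep_get?]
    · simp [hc, ih, pvHsStep_get?]

lemma pvOmax_foldl_some (t : List Int) (a : Int) :
    t.foldl pvOmax (some a) = some (t.foldl max a) := by
  induction t generalizing a with
  | nil => rfl
  | cons x t ih => simp [pvOmax, ih]

-- the final dict and its value at a character
def pvHs (cs : List Char) : PySem.Dict Char Int :=
  (PySem.List.enumerate cs).foldl pvHsStep PySem.Dict.empty

def pvL (cs : List Char) (c : Char) : Int := (pvHs cs).getD c 0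

def pvOcc (cs : List Char) (c : Char) : List Int :=
  ((PySem.List.enumerate cs).filter (fun p => p.2 == c)).map (·.1)

lemma mem_pvOcc (cs : List Char) (c : Char) (i : Int) :
    i ∈ pvOcc cs c ↔ ∃ (k : Nat) (_ : k < cs.length), i = (k : Int) ∧ cs[k] = c := by
  unfold pvOcc
  simp only [List.mem_map, List.mem_filter, PySem.List.mem_enumerate_iff]
  constructor
  · rintro ⟨p, ⟨⟨k, hk, rfl⟩, hc⟩, rfl⟩
    exact ⟨k, hk, by simpa using hc⟩
  · rintro ⟨k, hk, rfl, hc⟩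
    exact ⟨((k : Int), cs[k]), ⟨⟨k, hk, by simp⟩, by simpa using hc⟩, rfl⟩

-- pvL cs c is the LAST index of c in cs: it is an index of c, and bounds every index of c
lemma pvL_spec (cs : List Char) (c : Char) (hc : c ∈ cs) :
    (∃ (k : Nat) (_ : k < cs.length), pvL cs c = (k : Int) ∧ cs[k] = c) ∧
    (∀ (k : Nat) (h : k < cs.length), cs[k] = c → (k : Int) ≤ pvL cs c) := by
  have hocc : ∀ j : Int, j ∈ pvOcc cs c ↔ ∃ (k : Nat) (_ : k < cs.length), j = (k : Int) ∧ cs[k] = c :=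
    fun j => mem_pvOcc cs c j
  obtain ⟨k0, hk0, hck0⟩ := List.mem_iff_getElem.mp hc
  have hne : pvOcc cs c ≠ [] := by
    intro h
    have : (k0 : Int) ∈ pvOcc cs c := (hocc _).mpr ⟨k0, hk0, rfl, hck0⟩
    simp [h] at this
  obtain ⟨x, t, hxt⟩ := List.exists_cons_of_ne_nil hne
  have hval : pvL cs c = t.foldl max x := by
    have h1 : (pvHs cs).get? c = (pvOcc cs c).foldl pvOmax none := by
      unfold pvHs pvOcc
      rw [pvBuild_get?]
      rfl
    unfold pvL
    rw [PySem.Dict.getD_eq_get?_getD, h1, hxt]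
    simp only [List.foldl_cons]
    rw [show pvOmax none x = some x from rfl, pvOmax_foldl_some]
    rfl
  constructor
  · have hmem : t.foldl max x = x ∨ t.foldl max x ∈ t := PySem.List.foldl_max_mem t x
    have : pvL cs c ∈ pvOcc cs c := by
      rw [hval, hxt]
      rcases hmem with h | h
      · simp [h]
      · simp [h]
    exact (hocc _).mp this
  · intro k hk hck
    have hmem : (k : Int) ∈ pvOcc cs c := (hocc _).mpr ⟨k, hk, rfl, hck⟩
    rw [hxt] at hmem
    rw [hval]
    rcases List.mem_cons.mp hmem with h | h
    · rw [h]; exact (PySem.List.le_foldl_max t x).1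
    · exact (PySem.List.le_foldl_max t x).2 _ h

-- prefix max of g over a list, seeded with -1 (A's running max_index)
def pvPM (g : Char → Int) (cs : List Char) : Int := (cs.map g).foldl max (-1)

def pvScanStepG (g : Char → Int) (st : Int × Int) (p : Int × Char) : Int × Int :=
  let m := max st.1 (g p.2)
  if m = p.1 then (-1, st.2 + 1) else (m, st.2)

-- A's second loop: the running max satisfies max st.1 (len-1) = prefix max, and the count
-- counts the positions i whose prefix max equals i
lemma pvScan_spec (g : Char → Int) (cs : List Char)
    (hg : ∀ (k : Nat) (h : k < cs.length), (k : Int) ≤ g cs[k]) :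
    max ((PySem.List.enumerate cs).foldl (pvScanStepG g) (-1, 0)).1 ((cs.length : Int) - 1)
        = pvPM g cs ∧
    ((PySem.List.enumerate cs).foldl (pvScanStepG g) (-1, 0)).2
        = ((List.range cs.length).countP
            (fun i => decide (pvPM g (cs.take (i+1)) = (i : Int))) : Int) := by
  induction cs using List.reverseRecOn with
  | nil => simp [pvPM, PySem.List.enumerate_nil]
  | append_singleton ys c ih =>
    have hgy : ∀ (k : Nat) (h : k < ys.length), (k : Int) ≤ g ys[k] := by
      intro k h
      have h2 : k < (ys ++ [c]).length := by simp; omega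
      have := hg k h2
      rwa [List.getElem_append_left h] at this
    have hgc : (ys.length : Int) ≤ g c := by
      have h2 : ys.length < (ys ++ [c]).length := by simp
      have := hg ys.length h2
      simpa using this
    obtain ⟨ih1, ih2⟩ := ih hgy
    set st := (PySem.List.enumerate ys).foldl (pvScanStepG g) (-1, 0) with hst
    have hF : (PySem.List.enumerate (ys ++ [c])).foldl (pvScanStepG g) (-1, 0)
        = pvScanStepG g st ((ys.length : Int), c) := by
      rw [PySem.List.enumerate_append, List.foldl_append, ← hst]
      simp [PySem.List.enumerate_cons, PySem.List.enumerate_nil]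
    have hpm : pvPM g (ys ++ [c]) = max (pvPM g ys) (g c) := by
      simp [pvPM, List.foldl_append]
    have hL1 : ((ys.length : Int) - 1) ≤ g c := by omega
    have hm' : max st.1 (g c) = pvPM g (ys ++ [c]) := by
      rw [hpm, ← ih1, max_right_comm, max_eq_left (le_max_of_le_right hL1)]
    have hfull : (ys ++ [c]).take (ys.length + 1) = ys ++ [c] := by
      apply List.take_of_length_le; simp
    have hcnt : ((List.range (ys ++ [c]).length).countP
          (fun i => decide (pvPM g ((ys ++ [c]).take (i+1)) = (i : Int))))
        = (List.range ys.length).countP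
            (fun i => decide (pvPM g (ys.take (i+1)) = (i : Int)))
          + (if pvPM g (ys ++ [c]) = (ys.length : Int) then 1 else 0) := by
      have hlen : (ys ++ [c]).length = ys.length + 1 := by simp
      rw [hlen, List.range_succ, List.countP_append]
      congr 1
      · apply List.countP_congr
        intro i hi
        have hi' : i < ys.length := List.mem_range.mp hi
        rw [List.take_append_of_le_length (by omega)]
      · simp [hfull]
    by_cases hcut : max st.1 (g c) = (ys.length : Int)
    · have hpmfull : pvPM g (ys ++ [c]) = (ys.length : Int) := by rw [← hm', hcut]
      have hstep : pvScanStepG g st ((ys.length : Int), c) = (-1, st.2 + 1) := by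
        simp [pvScanStepG, hcut]
      rw [hF, hstep]
      constructor
      · simp only [List.length_append, List.length_cons, List.length_nil]
        push_cast
        rw [hpmfull]
        have : (0:Int) ≤ (ys.length : Int) := by positivity
        omega
      · rw [hcnt, if_pos hpmfull, ih2]
        push_cast
        ring
    · have hpmfull : pvPM g (ys ++ [c]) ≠ (ys.length : Int) := by rw [← hm']; exact hcut
      have hstep : pvScanStepG g st ((ys.length : Int), c) = (max st.1 (g c), st.2) := by
        simp [pvScanStepG, hcut]
      rw [hF, hstep]
      constructor
      · simp only [List.length_append, List.length_cons, List.length_nil]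
        push_cast
        rw [← hm']
        have : ((ys.length : Int) + 1 - 1) ≤ max st.1 (g c) := by
          have := le_max_of_le_right (b := st.1) hgc
          omega
        omega
      · rw [hcnt, if_neg hpmfull, ih2]
        push_cast
        ring

-- the prefix max hits i exactly when prefix and suffix share no character
lemma pvCut_iff (cs : List Char) (i : Nat) (hi : i < cs.length) :
    pvPM (pvL cs) (cs.take (i+1)) = (i : Int) ↔
      PySem.Set.isdisjoint (PySem.Set.ofList (cs.take (i+1))) (cs.drop (i+1)) = true := by
  rw [PySem.Set.isdisjoint_iff]
  have hmem_take : ∀ x, x ∈ cs.take (i+1) ↔ ∃ (j : Nat) (_ : j < cs.length), j ≤ i ∧ cs[j] = x := by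
    intro x
    constructor
    · intro hx
      obtain ⟨j, hj, hjx⟩ := List.mem_iff_getElem.mp hx
      have hj' : j < cs.length := lt_of_lt_of_le hj (by simp [List.length_take])
      refine ⟨j, hj', ?_, ?_⟩
      · have : j < i + 1 := lt_of_lt_of_le hj (by simp [List.length_take])
        omega
      · simpa using hjx
    · rintro ⟨j, hj, hji, rfl⟩
      have hj2 : j < (cs.take (i+1)).length := by simp [List.length_take]; omega
      exact List.mem_iff_getElem.mpr ⟨j, hj2, by simp [List.getElem_take]⟩
  have hmem_drop : ∀ x, x ∈ cs.drop (i+1) ↔ ∃ (k : Nat) (_ : k < cs.length), i < k ∧ cs[k] = x := by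
    intro x
    constructor
    · intro hx
      obtain ⟨j, hj, hjx⟩ := List.mem_iff_getElem.mp hx
      rw [List.getElem_drop] at hjx
      have : i + 1 + j < cs.length := by simp [List.length_drop] at hj; omega
      exact ⟨i + 1 + j, this, by omega, hjx⟩
    · rintro ⟨k, hk, hik, rfl⟩
      have hj : k - (i+1) < (cs.drop (i+1)).length := by simp [List.length_drop]; omega
      refine List.mem_iff_getElem.mpr ⟨k - (i+1), hj, ?_⟩
      rw [List.getElem_drop]
      congr 1
      omega
  constructor
  · -- prefix max = i → disjoint
    intro hpm x hx hxd
    rw [PySem.Set.mem_ofList] at hx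
    obtain ⟨j, hj, hji, hjx⟩ := (hmem_take x).mp hx
    obtain ⟨k, hk, hik, hkx⟩ := (hmem_drop x).mp hxd
    have hxcs : x ∈ cs := hjx ▸ List.getElem_mem hj
    have hle : (k : Int) ≤ pvL cs x := (pvL_spec cs x hxcs).2 k hk hkx
    have hub : pvL cs x ≤ pvPM (pvL cs) (cs.take (i+1)) := by
      have : pvL cs x ∈ (cs.take (i+1)).map (pvL cs) := List.mem_map_of_mem hx
      exact (PySem.List.le_foldl_max _ _).2 _ this
    rw [hpm] at hub
    omega
  · -- disjoint → prefix max = i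
    intro hdis
    have hub : ∀ y ∈ (cs.take (i+1)).map (pvL cs), y ≤ (i : Int) := by
      intro y hy
      obtain ⟨x, hx, rfl⟩ := List.mem_map.mp hy
      have hxcs : x ∈ cs := List.mem_of_mem_take hx
      obtain ⟨k, hk, hvk, hkx⟩ := (pvL_spec cs x hxcs).1
      by_contra hgt
      push Not at hgt
      have hik : i < k := by omega
      have : x ∈ cs.drop (i+1) := (hmem_drop x).mpr ⟨k, hk, hik, hkx⟩
      exact hdis x (by rw [PySem.Set.mem_ofList]; exact hx) this
    have hlb : (i : Int) ≤ pvPM (pvL cs) (cs.take (i+1)) := by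
      have hii : cs[i] ∈ cs.take (i+1) := (hmem_take cs[i]).mpr ⟨i, hi, le_refl i, rfl⟩
      have h1 : (i : Int) ≤ pvL cs cs[i] := (pvL_spec cs cs[i] (List.getElem_mem hi)).2 i hi rfl
      have h2 : pvL cs cs[i] ≤ pvPM (pvL cs) (cs.take (i+1)) :=
        (PySem.List.le_foldl_max _ _).2 _ (List.mem_map_of_mem hii)
      omega
    have hub' : pvPM (pvL cs) (cs.take (i+1)) ≤ (i : Int) := by
      unfold pvPM
      rcases PySem.List.foldl_max_mem ((cs.take (i+1)).map (pvL cs)) (-1) with h | h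
      · rw [h]; omega
      · exact hub _ h
    omega

lemma pvAlt_eq_count (s : String) :
    maxPartitions2_alt s
      = ((List.range s.toList.length).countP
          (fun i => PySem.Set.isdisjoint (PySem.Set.ofList (s.toList.take (i+1)))
                      (s.toList.drop (i+1))) : Int) := by
  unfold maxPartitions2_alt
  rw [PySem.Str.len_eq, PySem.List.pyRange_zero_nat, List.foldl_map]
  have hfun : (fun (acc : Int) (k : Nat) =>
        if PySem.Set.isdisjoint
             (PySem.Set.ofList (PySem.Chars.slice s.toList none (some ((k : Int) + 1))))
             (PySem.Chars.slice s.toList (some ((k : Int) + 1)) none)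
        then acc + 1 else acc)
      = (fun (acc : Int) (k : Nat) =>
        if (PySem.Set.isdisjoint (PySem.Set.ofList (s.toList.take (k+1)))
             (s.toList.drop (k+1))) = true
        then acc + 1 else acc) := by
    funext acc k
    have h1 : ((k : Int) + 1) = (((k + 1 : Nat)) : Int) := by push_cast; ring
    rw [h1, PySem.Chars.slice_eq_listSlice, PySem.Chars.slice_eq_listSlice,
        PySem.List.slice_to_natCast, PySem.List.slice_from_natCast]
  rw [hfun, PySem.List.foldl_if_add_one]
  simp

-- ===== VERDICT (by name: the statement is the Claim_ definition above) =====
theorem maxPartitions2_spec : Claim_equal_maxPartitions2 := by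
  intro s _
  show maxPartitions2 s = maxPartitions2_alt s
  have hA : maxPartitions2 s
      = ((PySem.List.enumerate s.toList).foldl (pvScanStepG (pvL s.toList)) (-1, 0)).2 := rfl
  rw [hA, pvAlt_eq_count]
  have hg : ∀ (k : Nat) (h : k < s.toList.length), (k : Int) ≤ pvL s.toList s.toList[k] := by
    intro k h
    exact (pvL_spec s.toList s.toList[k] (List.getElem_mem h)).2 k h rfl
  rw [(pvScan_spec (pvL s.toList) s.toList hg).2]
  congr 1
  apply List.countP_congr
  intro i hi
  have hi' : i < s.toList.length := List.mem_range.mp hi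
  simp [pvCut_iff s.toList i hi']
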